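-- pv_equiv track=rewrite | github.com/jongcoding/jonghub | baekjoon_coding/우선순위큐/최소힙.py | min_heapq
-- ===== SOURCE A (Python) =====
-- import heapq
--
-- def min_heapq(n, cmd):
--     result=[]
--     min_heap=[]
--
--     for i in range(n):
--         if cmd[i]==0:
--             if min_heap:
--                 result.append(heapq.heappop(min_heap))
--             else:
--                 result.append(0)
--         else:
--             heapq.heappush(min_heap,cmd[i])
--     return result
-- ===== SOURCE B (Python) =====
-- import bisect
--
-- def min_heapq(n, cmd):
--     result = []
--     pending = []  # kept fully sorted ascending; pending[0] is the minimum
--     for i in range(n):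
--         c = cmd[i]
--         if c:
--             bisect.insort(pending, c)
--         else:
--             result.append(pending.pop(0) if pending else 0)
--     return result
-- ===== Notes on version B (the rewrite author's own statement) =====
-- stated objective: alternative
-- what changed: Replaces the binary heap (heapq sift-up/sift-down) with a list kept fully sorted via bisect.insort, so a pop is simply removing the first element instead of a root replacement plus sift.
import Mathlib
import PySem

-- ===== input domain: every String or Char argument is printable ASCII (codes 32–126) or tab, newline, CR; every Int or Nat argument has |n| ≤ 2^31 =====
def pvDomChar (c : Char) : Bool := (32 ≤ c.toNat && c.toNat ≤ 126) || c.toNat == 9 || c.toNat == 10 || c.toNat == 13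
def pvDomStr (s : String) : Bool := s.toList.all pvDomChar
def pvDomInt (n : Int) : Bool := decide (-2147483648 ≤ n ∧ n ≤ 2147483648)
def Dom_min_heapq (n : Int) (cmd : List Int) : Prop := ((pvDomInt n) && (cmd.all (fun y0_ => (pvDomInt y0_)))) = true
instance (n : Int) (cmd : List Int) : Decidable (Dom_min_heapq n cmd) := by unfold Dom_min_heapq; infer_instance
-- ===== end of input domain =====

-- B replaces A's heapq binary heap with a list kept fully sorted by bisect.insort (pop = take the head);
-- same outputs, different data representation ("alternative", not claimed faster).

-- ===== PORT A =====
-- CPython heapq._siftdown(heap, 0, pos) with newitem = heap[pos] passed explicitly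
-- (the loop writes heap[pos] = parent and moves up; the final write heap[pos] = newitem is the base case).
def pySiftdown (heap : List Int) (pos : Nat) (newitem : Int) : List Int :=
  if _h : 0 < pos then
    let parentpos := (pos - 1) / 2
    let parent := heap.getD parentpos 0
    if newitem < parent then
      pySiftdown (heap.set pos parent) parentpos newitem
    else heap.set pos newitem
  else heap.set pos newitem
termination_by pos
decreasing_by omega

-- the go-down-to-a-leaf loop of CPython heapq._siftup (newitem is not consulted in the loop)
def pySiftupLoop (heap : List Int) (pos : Nat) : List Int × Nat :=
  let endpos := heap.length
  let childpos := 2 * pos + 1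
  if _h : childpos < endpos then
    let rightpos := childpos + 1
    let childpos2 := if rightpos < endpos ∧ ¬ (heap.getD childpos 0 < heap.getD rightpos 0) then rightpos else childpos
    pySiftupLoop (heap.set pos (heap.getD childpos2 0)) childpos2
  else (heap, pos)
termination_by heap.length - pos
decreasing_by simp only [List.length_set]; split <;> omega

-- CPython heapq._siftup(heap, 0): walk the hole to a leaf, drop newitem there, bubble it back up
def pySiftup (heap : List Int) : List Int :=
  let newitem := heap.getD 0 0
  let hp := pySiftupLoop heap 0
  pySiftdown hp.1 hp.2 newitem

-- heapq.heappush: append, then sift the new item up from the last slot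
def pyHeappush (heap : List Int) (item : Int) : List Int :=
  pySiftdown (heap ++ [item]) heap.length item

-- heapq.heappop: pop the last element; if the heap is still non-empty, move it to the root and sift up
def pyHeappop (heap : List Int) : Int × List Int :=
  let lastelt := heap.getLast?.getD 0
  let rest := heap.dropLast
  if rest.isEmpty then (lastelt, rest)
  else (rest.getD 0 0, pySiftup (rest.set 0 lastelt))

def minHeapqStepA (cmd : List Int) (st : List Int × List Int) (i : Int) : List Int × List Int :=
  let c := (PySem.List.pyGet? cmd i).getD 0   -- cmd[i]; in range for every i of the loop under Pre_
  if c = 0 then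
    if st.2.isEmpty then (st.1 ++ [0], st.2)
    else
      let vr := pyHeappop st.2
      (st.1 ++ [vr.1], vr.2)
  else (st.1, pyHeappush st.2 c)

def min_heapq (n : Int) (cmd : List Int) : List Int :=
  ((PySem.List.pyRange 0 n 1).foldl (minHeapqStepA cmd) ([], [])).1

-- ===== PORT B =====
-- bisect.insort: insert after existing equal entries (bisect_right)
def pyInsort (l : List Int) (x : Int) : List Int :=
  match l with
  | [] => [x]
  | y :: ys => if x < y then x :: y :: ys else y :: pyInsort ys x

def minHeapqStepB (cmd : List Int) (st : List Int × List Int) (i : Int) : List Int × List Int :=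
  let c := (PySem.List.pyGet? cmd i).getD 0   -- cmd[i]; in range for every i of the loop under Pre_
  if c ≠ 0 then (st.1, pyInsort st.2 c)
  else
    match st.2 with
    | [] => (st.1 ++ [0], [])
    | x :: rest => (st.1 ++ [x], rest)

def min_heapq_alt (n : Int) (cmd : List Int) : List Int :=
  ((PySem.List.pyRange 0 n 1).foldl (minHeapqStepB cmd) ([], [])).1

-- ===== PRECONDITION & SPEC =====
-- A raises IndexError on cmd[i] as soon as n exceeds len(cmd) (and so does B); nothing else raises.
def Pre_min_heapq (n : Int) (cmd : List Int) : Prop := n ≤ (cmd.length : Int)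
instance (n : Int) (cmd : List Int) : Decidable (Pre_min_heapq n cmd) := by unfold Pre_min_heapq; infer_instance
def pvWitness_min_heapq : Int × List Int := (3, [5, 0, 0])

def Spec_min_heapq (n : Int) (cmd : List Int) (out : List Int) : Prop := out = min_heapq_alt n cmd
instance (n : Int) (cmd : List Int) (out : List Int) : Decidable (Spec_min_heapq n cmd out) := by unfold Spec_min_heapq; infer_instance

-- ===== CLAIM (what is proved, stated in full; the proofs are below) =====
def Claim_equal_min_heapq : Prop := ∀ (n : Int) (cmd : List Int), Dom_min_heapq n cmd → Pre_min_heapq n cmd → Spec_min_heapq n cmd (min_heapq n cmd)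

-- ===== LEMMAS AND PROOFS =====

-- getD/set infrastructure
theorem getD_set_self (l : List Int) (i : Nat) (x d : Int) (h : i < l.length) : (l.set i x).getD i d = x := by
  simp [List.getD_eq_getElem?_getD, h]

theorem getD_set_ne (l : List Int) (i j : Nat) (x d : Int) (h : i ≠ j) : (l.set i x).getD j d = l.getD j d := by
  simp [List.getD_eq_getElem?_getD, List.getElem?_set_ne h]

theorem eraseIdx_set_lt (l : List Int) (i j : Nat) (a : Int) (h : i < j) :
    (l.set i a).eraseIdx j = (l.eraseIdx j).set i a := by
  rw [List.eraseIdx_set]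
  simp [Nat.ne_of_gt h, Nat.not_lt.mpr (Nat.le_of_lt h)]

theorem set_perm_cons_eraseIdx (l : List Int) (k : Nat) (v : Int) (h : k < l.length) :
    (l.set k v).Perm (v :: l.eraseIdx k) := by
  rw [List.set_eq_take_append_cons_drop, if_pos h, List.eraseIdx_eq_take_drop_succ]
  exact List.perm_middle

theorem set_swap_perm_lt (l : List Int) (i j : Nat) (a b : Int) (hj : j < l.length)
    (hij : i < j) : ((l.set i a).set j b).Perm ((l.set i b).set j a) := by
  have h1 : ((l.set i a).set j b).Perm (b :: (l.eraseIdx j).set i a) := by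
    have := set_perm_cons_eraseIdx (l.set i a) j b (by simpa using hj)
    rwa [eraseIdx_set_lt _ _ _ _ hij] at this
  have h2 : ((l.set i b).set j a).Perm (a :: (l.eraseIdx j).set i b) := by
    have := set_perm_cons_eraseIdx (l.set i b) j a (by simpa using hj)
    rwa [eraseIdx_set_lt _ _ _ _ hij] at this
  have hilen : i < (l.eraseIdx j).length := by rw [List.length_eraseIdx_of_lt hj]; omega
  have h3 : ((l.eraseIdx j).set i a).Perm (a :: (l.eraseIdx j).eraseIdx i) :=
    set_perm_cons_eraseIdx _ _ _ hilen
  have h4 : ((l.eraseIdx j).set i b).Perm (b :: (l.eraseIdx j).eraseIdx i) :=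
    set_perm_cons_eraseIdx _ _ _ hilen
  exact h1.trans ((h3.cons b).trans (((List.Perm.swap a b _).trans
    ((h4.cons a).symm)).trans h2.symm))

theorem set_swap_perm (l : List Int) (i j : Nat) (a b : Int) (hi : i < l.length) (hj : j < l.length)
    (hij : i ≠ j) : ((l.set i a).set j b).Perm ((l.set i b).set j a) := by
  rcases Nat.lt_or_ge i j with hlt | hge
  · exact set_swap_perm_lt l i j a b hj hlt
  · have hji : j < i := by omega
    rw [List.set_comm _ _ hij, List.set_comm b a hij]
    exact set_swap_perm_lt l j i b a hi hji

-- the binary-heap invariant of heapq: every non-root entry dominates its parent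
def heapProp (h : List Int) : Prop :=
  ∀ j, 0 < j → j < h.length → h.getD ((j - 1) / 2) 0 ≤ h.getD j 0

theorem set_own (l : List Int) (k : Nat) (h : k < l.length) : l.set k (l.getD k 0) = l := by
  rw [List.getD_eq_getElem _ _ h]; exact List.set_getElem_self h

-- writing x at pos restores the heap shape, given the hole invariant
theorem setHeap (h : List Int) (pos : Nat) (x : Int) (hpos : pos < h.length)
    (hA1 : ∀ j, 0 < j → j < h.length → j ≠ pos → (j - 1) / 2 ≠ pos → h.getD ((j - 1) / 2) 0 ≤ h.getD j 0)
    (hA2 : ∀ j, 0 < j → j < h.length → (j - 1) / 2 = pos → j ≠ pos → x ≤ h.getD j 0)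
    (hedge : 0 < pos → h.getD ((pos - 1) / 2) 0 ≤ x) : heapProp (h.set pos x) := by
  intro j hj hjlen
  rw [List.length_set] at hjlen
  by_cases hjp : j = pos
  · subst hjp
    rw [getD_set_ne _ _ _ _ _ (by omega), getD_set_self _ _ _ _ hpos]
    exact hedge hj
  · by_cases hpj : (j - 1) / 2 = pos
    · rw [hpj, getD_set_self _ _ _ _ hpos, getD_set_ne _ _ _ _ _ (Ne.symm hjp)]
      exact hA2 j hj hjlen hpj hjp
    · rw [getD_set_ne _ _ _ _ _ (fun e => hpj e.symm), getD_set_ne _ _ _ _ _ (Ne.symm hjp)]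
      exact hA1 j hj hjlen hjp hpj

theorem siftdown_ok (pos : Nat) (h : List Int) (x : Int) (hpos : pos < h.length)
    (hA1 : ∀ j, 0 < j → j < h.length → j ≠ pos → (j - 1) / 2 ≠ pos → h.getD ((j - 1) / 2) 0 ≤ h.getD j 0)
    (hA2 : ∀ j, 0 < j → j < h.length → (j - 1) / 2 = pos → j ≠ pos → x ≤ h.getD j 0)
    (hA3 : 0 < pos → ∀ j, 0 < j → j < h.length → (j - 1) / 2 = pos → h.getD ((pos - 1) / 2) 0 ≤ h.getD j 0) :
    heapProp (pySiftdown h pos x) ∧ (pySiftdown h pos x).Perm (h.set pos x) := by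
  induction pos using Nat.strong_induction_on generalizing h with
  | _ pos ih =>
  rw [pySiftdown]
  by_cases hp : 0 < pos
  · simp only [dif_pos hp]
    set pp := (pos - 1) / 2 with hppdef
    have hpplt : pp < pos := by omega
    by_cases hx : x < h.getD pp 0
    · rw [if_pos hx]
      set parent := h.getD pp 0 with hpar
      set h' := h.set pos parent with hh'
      have hlen' : h'.length = h.length := by rw [hh', List.length_set]
      have hgetne : ∀ k, k ≠ pos → h'.getD k 0 = h.getD k 0 := fun k hk =>
        getD_set_ne _ _ _ _ _ (Ne.symm hk)
      have hgetpos : h'.getD pos 0 = parent := getD_set_self _ _ _ _ hpos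
      have hA1' : ∀ j, 0 < j → j < h'.length → j ≠ pp → (j - 1) / 2 ≠ pp →
          h'.getD ((j - 1) / 2) 0 ≤ h'.getD j 0 := by
        intro j hj hjlen hjpp hpjpp
        rw [hlen'] at hjlen
        by_cases hjpos : j = pos
        · exact absurd (hjpos ▸ rfl) hpjpp
        · by_cases hpjpos : (j - 1) / 2 = pos
          · rw [hpjpos, hgetpos, hgetne j hjpos]
            exact hA3 hp j hj hjlen hpjpos
          · rw [hgetne _ hpjpos, hgetne _ hjpos]
            exact hA1 j hj hjlen hjpos hpjpos
      have hA2' : ∀ j, 0 < j → j < h'.length → (j - 1) / 2 = pp → j ≠ pp →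
          x ≤ h'.getD j 0 := by
        intro j hj hjlen hpjpp hjpp
        rw [hlen'] at hjlen
        by_cases hjpos : j = pos
        · rw [hjpos, hgetpos]; exact le_of_lt hx
        · rw [hgetne j hjpos]
          have hkey := hA1 j hj hjlen hjpos (by omega)
          rw [hpjpp] at hkey
          exact le_trans (le_of_lt hx) hkey
      have hA3' : 0 < pp → ∀ j, 0 < j → j < h'.length → (j - 1) / 2 = pp →
          h'.getD ((pp - 1) / 2) 0 ≤ h'.getD j 0 := by
        intro hpp j hj hjlen hpjpp
        rw [hlen'] at hjlen
        have hgp : (pp - 1) / 2 ≠ pos := by omega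
        have hkey : h.getD ((pp - 1) / 2) 0 ≤ parent := by
          have := hA1 pp hpp (by omega) (by omega) (by omega)
          rw [hpar]; exact this
        rw [hgetne _ hgp]
        by_cases hjpos : j = pos
        · rw [hjpos, hgetpos]; exact hkey
        · rw [hgetne j hjpos]
          have hkey2 := hA1 j hj hjlen hjpos (by omega)
          rw [hpjpp, ← hpar] at hkey2
          exact le_trans hkey hkey2
      obtain ⟨hheap, hperm⟩ := ih pp hpplt h' (by omega) hA1' hA2' hA3'
      refine ⟨hheap, hperm.trans ?_⟩
      have hswap : ((h.set pos parent).set pp x).Perm ((h.set pos x).set pp parent) :=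
        set_swap_perm h pos pp parent x hpos (by omega) (by omega)
      have hfix : (h.set pos x).set pp parent = h.set pos x := by
        have : (h.set pos x).getD pp 0 = parent := hpar ▸ getD_set_ne _ _ _ _ _ (by omega)
        rw [← this]; exact set_own _ _ (by rw [List.length_set]; omega)
      rw [hh']
      exact hswap.trans (by rw [hfix])
    · rw [if_neg hx]
      exact ⟨setHeap h pos x hpos hA1 hA2 (fun _ => le_of_not_gt hx), List.Perm.refl _⟩
  · simp only [dif_neg hp]
    exact ⟨setHeap h pos x hpos hA1 hA2 (fun c => absurd c hp), List.Perm.refl _⟩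

-- one step of the go-down loop: the hole moves to the smaller child
theorem siftupStep (h : List Int) (pos c : Nat) (hpos : pos < h.length) (hclen : c < h.length)
    (hc : (c - 1) / 2 = pos) (hcgt : pos < c)
    (hmin : ∀ s, 0 < s → s < h.length → (s - 1) / 2 = pos → h.getD c 0 ≤ h.getD s 0)
    (hB1 : ∀ j, 0 < j → j < h.length → j ≠ pos → (j - 1) / 2 ≠ pos → h.getD ((j - 1) / 2) 0 ≤ h.getD j 0)
    (hB2 : 0 < pos → ∀ j, 0 < j → j < h.length → (j - 1) / 2 = pos → h.getD ((pos - 1) / 2) 0 ≤ h.getD j 0) :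
    (∀ j, 0 < j → j < h.length → j ≠ c → (j - 1) / 2 ≠ c →
      (h.set pos (h.getD c 0)).getD ((j - 1) / 2) 0 ≤ (h.set pos (h.getD c 0)).getD j 0) ∧
    (0 < c → ∀ j, 0 < j → j < h.length → (j - 1) / 2 = c →
      (h.set pos (h.getD c 0)).getD ((c - 1) / 2) 0 ≤ (h.set pos (h.getD c 0)).getD j 0) ∧
    (∀ x : Int, ((h.set pos (h.getD c 0)).set c x).Perm (h.set pos x)) := by
  set h' := h.set pos (h.getD c 0) with hh'
  have hgetne : ∀ k, k ≠ pos → h'.getD k 0 = h.getD k 0 := fun k hk =>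
    getD_set_ne _ _ _ _ _ (Ne.symm hk)
  have hgetpos : h'.getD pos 0 = h.getD c 0 := getD_set_self _ _ _ _ hpos
  refine ⟨?_, ?_, ?_⟩
  · intro j hj hjlen hjc hpjc
    by_cases hjpos : j = pos
    · subst hjpos
      rw [hgetne _ (by omega), hgetpos]
      exact hB2 hj c (by omega) hclen hc
    · by_cases hpjpos : (j - 1) / 2 = pos
      · rw [hpjpos, hgetpos, hgetne j hjpos]
        exact hmin j hj hjlen hpjpos
      · rw [hgetne _ hpjpos, hgetne j hjpos]
        exact hB1 j hj hjlen hjpos hpjpos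
  · intro _ j hj hjlen hpjc
    rw [hc, hgetpos, hgetne j (by omega)]
    have hkey := hB1 j hj hjlen (by omega) (by omega)
    rw [hpjc] at hkey
    exact le_trans (le_refl _) hkey
  · intro x
    have hswap : ((h.set pos (h.getD c 0)).set c x).Perm ((h.set pos x).set c (h.getD c 0)) :=
      set_swap_perm h pos c (h.getD c 0) x hpos hclen (by omega)
    have hfix : (h.set pos x).set c (h.getD c 0) = h.set pos x := by
      have : (h.set pos x).getD c 0 = h.getD c 0 := getD_set_ne _ _ _ _ _ (by omega)
      rw [← this]; exact set_own _ _ (by rw [List.length_set]; omega)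
    rw [hh']
    exact hswap.trans (by rw [hfix])

theorem siftupLoop_aux (m : Nat) : ∀ (h : List Int) (pos : Nat), h.length - pos = m → pos < h.length →
    (∀ j, 0 < j → j < h.length → j ≠ pos → (j - 1) / 2 ≠ pos → h.getD ((j - 1) / 2) 0 ≤ h.getD j 0) →
    (0 < pos → ∀ j, 0 < j → j < h.length → (j - 1) / 2 = pos → h.getD ((pos - 1) / 2) 0 ≤ h.getD j 0) →
    (pySiftupLoop h pos).1.length = h.length ∧ (pySiftupLoop h pos).2 < h.length ∧
    ¬ (2 * (pySiftupLoop h pos).2 + 1 < h.length) ∧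
    (∀ j, 0 < j → j < h.length → j ≠ (pySiftupLoop h pos).2 → (j - 1) / 2 ≠ (pySiftupLoop h pos).2 →
      (pySiftupLoop h pos).1.getD ((j - 1) / 2) 0 ≤ (pySiftupLoop h pos).1.getD j 0) ∧
    (∀ x : Int, ((pySiftupLoop h pos).1.set (pySiftupLoop h pos).2 x).Perm (h.set pos x)) := by
  induction m using Nat.strong_induction_on with
  | _ m ih =>
  intro h pos hm hpos hB1 hB2
  rw [pySiftupLoop]
  by_cases hlt : 2 * pos + 1 < h.length
  · simp only [dif_pos hlt]
    by_cases hcond : 2 * pos + 1 + 1 < h.length ∧ ¬ (h.getD (2 * pos + 1) 0 < h.getD (2 * pos + 1 + 1) 0)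
    · rw [if_pos hcond]
      set c := 2 * pos + 1 + 1 with hcdef
      have hclen : c < h.length := hcond.1
      have hmin : ∀ s, 0 < s → s < h.length → (s - 1) / 2 = pos → h.getD c 0 ≤ h.getD s 0 := by
        intro s hs hslen hps
        have : s = 2 * pos + 1 ∨ s = c := by omega
        rcases this with rfl | rfl
        · exact le_of_not_gt hcond.2
        · exact le_refl _
      obtain ⟨hB1', hB2', hperm'⟩ := siftupStep h pos c hpos hclen (by omega) (by omega) hmin hB1 hB2
      have hlen' : (h.set pos (h.getD c 0)).length = h.length := List.length_set ..
      obtain ⟨l1, l2, l3, l4, l5⟩ := ih (h.length - c) (by omega) (h.set pos (h.getD c 0)) c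
        (by rw [hlen']) (by omega) (by rw [hlen']; exact hB1') (by rw [hlen']; exact fun _ => hB2' (by omega))
      rw [hlen'] at l1 l2 l3 l4
      exact ⟨l1, l2, l3, l4, fun x => (l5 x).trans (hperm' x)⟩
    · rw [if_neg hcond]
      set c := 2 * pos + 1 with hcdef
      have hmin : ∀ s, 0 < s → s < h.length → (s - 1) / 2 = pos → h.getD c 0 ≤ h.getD s 0 := by
        intro s hs hslen hps
        have : s = c ∨ s = 2 * pos + 1 + 1 := by omega
        rcases this with rfl | rfl
        · exact le_refl _
        · rcases Decidable.not_and_iff_not_or_not.mp hcond with hb | hb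
          · omega
          · exact le_of_lt (not_not.mp hb)
      obtain ⟨hB1', hB2', hperm'⟩ := siftupStep h pos c hpos hlt (by omega) (by omega) hmin hB1 hB2
      have hlen' : (h.set pos (h.getD c 0)).length = h.length := List.length_set ..
      obtain ⟨l1, l2, l3, l4, l5⟩ := ih (h.length - c) (by omega) (h.set pos (h.getD c 0)) c
        (by rw [hlen']) (by omega) (by rw [hlen']; exact hB1') (by rw [hlen']; exact fun _ => hB2' (by omega))
      rw [hlen'] at l1 l2 l3 l4
      exact ⟨l1, l2, l3, l4, fun x => (l5 x).trans (hperm' x)⟩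
  · simp only [dif_neg hlt]
    refine ⟨?_, ?_, ?_, ?_, ?_⟩
    · trivial
    · exact hpos
    · exact hlt
    · exact fun j hj hjl hjp hpjp => hB1 j hj hjl hjp hpjp
    · exact fun x => List.Perm.refl _

theorem root_le (h : List Int) (hp : heapProp h) : ∀ j, j < h.length → h.getD 0 0 ≤ h.getD j 0 := by
  intro j
  induction j using Nat.strong_induction_on with
  | _ j ih =>
    intro hj
    rcases Nat.eq_zero_or_pos j with rfl | hjpos
    · exact le_refl _
    · exact le_trans (ih ((j - 1) / 2) (by omega) (by omega)) (hp j hjpos hj)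

theorem root_le_mem (h : List Int) (hp : heapProp h) : ∀ a ∈ h, h.getD 0 0 ≤ a := by
  intro a ha
  obtain ⟨j, hj, rfl⟩ := List.mem_iff_getElem.mp ha
  rw [← List.getD_eq_getElem h 0 hj]
  exact root_le h hp j hj

theorem heappush_ok (h : List Int) (c : Int) (hp : heapProp h) :
    heapProp (pyHeappush h c) ∧ (pyHeappush h c).Perm (c :: h) := by
  have hlen : h.length < (h ++ [c]).length := by simp
  obtain ⟨h1, h2⟩ := siftdown_ok h.length (h ++ [c]) c hlen
    (by
      intro j hj hjlen hjne hpjne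
      simp only [List.length_append, List.length_cons, List.length_nil] at hjlen
      rw [List.getD_append _ _ _ _ (by omega), List.getD_append _ _ _ _ (by omega)]
      exact hp j hj (by omega))
    (by intro j hj hjlen hpj hjne; simp at hjlen; omega)
    (by intro hp0 j hj hjlen hpj; simp at hjlen; omega)
  have hfix : (h ++ [c]).set h.length c = h ++ [c] := by
    have : (h ++ [c]).getD h.length 0 = c := by
      rw [List.getD_append_right _ _ _ _ (le_refl _)]; simp
    have h8 := set_own (h ++ [c]) h.length hlen
    rw [this] at h8; exact h8
  rw [hfix] at h2
  exact ⟨h1, h2.trans (List.perm_append_singleton c h)⟩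

theorem heappop_ok (h : List Int) (hne : h ≠ []) (hp : heapProp h) :
    (pyHeappop h).1 = h.getD 0 0 ∧ heapProp (pyHeappop h).2 ∧
    ((pyHeappop h).1 :: (pyHeappop h).2).Perm h := by
  obtain ⟨l, a, rfl⟩ : ∃ l a, h = l ++ [a] :=
    ⟨h.dropLast, h.getLast hne, (List.dropLast_append_getLast hne).symm⟩
  match l with
  | [] =>
    simp [pyHeappop, heapProp]
  | b :: l' =>
    set l : List Int := b :: l' with hl
    have hl0 : 0 < l.length := by simp [hl]
    have hpop : pyHeappop (l ++ [a]) = (l.getD 0 0, pySiftup (l.set 0 a)) := by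
      rw [pyHeappop]
      simp only [List.dropLast_concat, List.getLast?_concat, Option.getD_some]
      rw [if_neg (by simp [hl])]
    rw [hpop]
    -- the rebuilt root position
    have hlenh0 : (l.set 0 a).length = l.length := List.length_set ..
    obtain ⟨l1, l2, l3, l4, l5⟩ := siftupLoop_aux ((l.set 0 a).length - 0) (l.set 0 a) 0 rfl
      (by omega)
      (by
        intro j hj hjlen hjne hpjne
        rw [hlenh0] at hjlen
        rw [getD_set_ne _ _ _ _ _ (by omega), getD_set_ne _ _ _ _ _ (by omega)]
        have hval : ∀ k, k < l.length → l.getD k 0 = (l ++ [a]).getD k 0 := fun k hk =>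
          (List.getD_append _ _ _ _ hk).symm
        rw [hval ((j - 1) / 2) (by omega), hval j (by omega)]
        exact hp j hj (by simp; omega))
      (by omega)
    rw [hlenh0] at l2 l3 l4
    obtain ⟨s1, s2⟩ := siftdown_ok (pySiftupLoop (l.set 0 a) 0).2 (pySiftupLoop (l.set 0 a) 0).1 a
      (by rw [l1, hlenh0]; exact l2)
      (by rw [l1, hlenh0]; exact l4)
      (by intro j hj hjlen hpj hjne; rw [l1, hlenh0] at hjlen; omega)
      (by intro h0 j hj hjlen hpj; rw [l1, hlenh0] at hjlen; omega)
    have hnew : pySiftup (l.set 0 a) = pySiftdown (pySiftupLoop (l.set 0 a) 0).1 (pySiftupLoop (l.set 0 a) 0).2 ((l.set 0 a).getD 0 0) := rfl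
    have hroot : (l.set 0 a).getD 0 0 = a := getD_set_self _ _ _ _ hl0
    rw [hroot] at hnew
    have hperm : (pySiftup (l.set 0 a)).Perm (l.set 0 a) := by
      rw [hnew]
      refine s2.trans ((l5 a).trans ?_)
      rw [List.set_set]
    refine ⟨?_, ?_, ?_⟩
    · exact (List.getD_append _ _ _ _ hl0).symm
    · rw [hnew]; exact s1
    · have h6 : (pySiftup (l.set 0 a)).Perm (a :: l') := by
        refine hperm.trans ?_
        rw [hl]
        exact List.Perm.refl _
      have h7 : l.getD 0 0 = b := by rw [hl]; rfl
      rw [h7]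
      refine ((h6.cons b).trans ?_)
      have : (a :: l').Perm (l' ++ [a]) := (List.perm_append_singleton a l').symm
      exact (this.cons b)

theorem insort_perm (l : List Int) (x : Int) : (pyInsort l x).Perm (x :: l) := by
  induction l with
  | nil => simp [pyInsort]
  | cons y ys ih =>
    by_cases hxy : x < y
    · simp [pyInsort, hxy]
    · simpa [pyInsort, hxy] using ((ih.cons y).trans (List.Perm.swap x y ys))

theorem insort_sorted (l : List Int) (x : Int) (hs : l.Pairwise (· ≤ ·)) :
    (pyInsort l x).Pairwise (· ≤ ·) := by
  induction l with
  | nil => simp [pyInsort]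
  | cons y ys ih =>
    rw [List.pairwise_cons] at hs
    by_cases hxy : x < y
    · rw [pyInsort, if_pos hxy, List.pairwise_cons]
      refine ⟨?_, by rw [List.pairwise_cons]; exact hs⟩
      intro b hb
      rcases List.mem_cons.mp hb with rfl | hb
      · exact le_of_lt hxy
      · exact le_trans (le_of_lt hxy) (hs.1 b hb)
    · rw [pyInsort, if_neg hxy, List.pairwise_cons]
      refine ⟨?_, ih hs.2⟩
      intro b hb
      rcases List.mem_cons.mp ((List.Perm.mem_iff (insort_perm ys x)).mp hb) with hbx | hb2
      · rw [hbx]; exact le_of_not_gt hxy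
      · exact hs.1 b hb2

-- the head of a sorted list equals the root of any heap with the same contents
theorem root_eq_head (h : List Int) (v : Int) (t : List Int) (hp : heapProp h)
    (hs : (v :: t).Pairwise (· ≤ ·)) (hperm : h.Perm (v :: t)) : h.getD 0 0 = v := by
  have hne : h ≠ [] := by
    intro hnil; rw [hnil] at hperm; exact (List.cons_ne_nil v t) (List.Perm.nil_eq hperm).symm
  have hroot_mem : h.getD 0 0 ∈ h := by
    rw [List.getD_eq_getElem h 0 (List.length_pos_iff.mpr hne)]
    exact List.getElem_mem _
  have hv_mem : v ∈ h := (List.Perm.mem_iff hperm).mpr (List.mem_cons_self)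
  have h1 : h.getD 0 0 ≤ v := root_le_mem h hp v hv_mem
  have h2 : v ≤ h.getD 0 0 := by
    rcases List.mem_cons.mp ((List.Perm.mem_iff hperm).mp hroot_mem) with heq | hmem
    · exact le_of_eq heq.symm
    · exact (List.pairwise_cons.mp hs).1 _ hmem
  exact le_antisymm h1 h2

-- the main loop invariant: equal results so far; the heap and the sorted list hold the same multiset
theorem fold_rel (cmd : List Int) (is : List Int) : ∀ (res hA pB : List Int),
    heapProp hA → pB.Pairwise (· ≤ ·) → hA.Perm pB →
    (is.foldl (minHeapqStepA cmd) (res, hA)).1 = (is.foldl (minHeapqStepB cmd) (res, pB)).1 := by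
  induction is with
  | nil => intro res hA pB _ _ _; rfl
  | cons i is ih =>
    intro res hA pB hheap hsort hperm
    simp only [List.foldl_cons, minHeapqStepA, minHeapqStepB]
    set c : Int := (PySem.List.pyGet? cmd i).getD 0 with hc
    by_cases hc0 : c = 0
    · rw [if_pos hc0, if_neg (not_not_intro hc0)]
      cases pB with
      | nil =>
        have hAnil : hA = [] := hperm.eq_nil
        subst hAnil
        show (List.foldl (minHeapqStepA cmd) (res ++ [0], []) is).1 =
          (List.foldl (minHeapqStepB cmd) (res ++ [0], []) is).1
        exact ih (res ++ [0]) [] [] hheap hsort hperm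
      | cons v t =>
        have hAne : hA ≠ [] := by
          intro hnil; rw [hnil] at hperm; exact (List.cons_ne_nil v t) (hperm.nil_eq).symm
        rw [if_neg (by simpa [List.isEmpty_iff] using hAne)]
        obtain ⟨p1, p2, p3⟩ := heappop_ok hA hAne hheap
        have hv : (pyHeappop hA).1 = v := by
          rw [p1]; exact root_eq_head hA v t hheap hsort hperm
        have ht : (pyHeappop hA).2.Perm t := by
          have := p3.trans hperm
          rw [hv] at this
          exact this.cons_inv
        rw [hv]
        exact ih (res ++ [v]) (pyHeappop hA).2 t p2 (List.pairwise_cons.mp hsort).2 ht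
    · rw [if_neg hc0, if_pos hc0]
      obtain ⟨q1, q2⟩ := heappush_ok hA c hheap
      exact ih res (pyHeappush hA c) (pyInsort pB c) q1 (insort_sorted pB c hsort)
        (q2.trans ((hperm.cons c).trans (insort_perm pB c).symm))

-- ===== VERDICT (by name: the statement is the Claim_ definition above) =====
theorem min_heapq_spec : Claim_equal_min_heapq := by
  intro n cmd _ _
  unfold Spec_min_heapq min_heapq min_heapq_alt
  exact fold_rel cmd _ [] [] [] (by intro j hj hlen; simp at hlen) (by simp) (List.Perm.refl _)
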